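-- pv_equiv track=rewrite | github.com/rao457/Python | test.py | sort_names
-- ===== SOURCE A (Python) =====
-- def sort_names(my_list):
--     new_list= []
--     for i in my_list:
--         new_list.append(len(i))
--
--     n = len(new_list)
--     for i in range(1, n):
--         key = new_list[i]
--         j = i-1
--         while j>= 0 and key < new_list[j]:
--             new_list[j+1] = new_list[j]
--             j -= 1
--         new_list[j+1] = key
--     sorted_list = []
--     my_dict = {}
--     for i in new_list:
--         value = i
--         for name in my_list:
--             if len(name) == value:
--                 my_dict[value] = name
--     for value in my_dict.values():
--         sorted_list.append(value)
--     return sorted_list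
-- ===== SOURCE B (Python) =====
-- def sort_names(my_list):
--     d = {}
--     for name in my_list:
--         d[len(name)] = name
--     return [d[l] for l in sorted(d)]
-- ===== Notes on version B (the rewrite author's own statement) =====
-- stated objective: faster
-- what changed: A insertion-sorts the length list in place (O(n^2)) and then, for every (repeated) sorted length, rescans the whole name list to overwrite the dict entry (O(n^2)); B makes one pass building a dict length -> last name and sorts only the distinct lengths (O(n log n)).
import Mathlib
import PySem

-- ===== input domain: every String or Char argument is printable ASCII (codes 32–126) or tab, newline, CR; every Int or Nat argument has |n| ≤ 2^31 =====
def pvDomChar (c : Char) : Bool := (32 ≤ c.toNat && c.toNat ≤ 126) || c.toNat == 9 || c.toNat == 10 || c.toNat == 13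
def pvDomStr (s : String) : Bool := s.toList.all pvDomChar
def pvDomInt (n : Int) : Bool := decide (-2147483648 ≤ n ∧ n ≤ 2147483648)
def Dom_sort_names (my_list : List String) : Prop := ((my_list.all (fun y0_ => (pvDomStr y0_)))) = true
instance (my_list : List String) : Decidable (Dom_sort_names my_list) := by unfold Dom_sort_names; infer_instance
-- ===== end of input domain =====

-- B replaces A's in-place insertion sort of the lengths plus a rescan of the whole name
-- list for every (repeated) length by one dict pass (length -> last name) and a sort of
-- the distinct keys; same return value, proved below.

-- ===== PORT A =====
-- the while loop 'while j >= 0 and key < new_list[j]: new_list[j+1] = new_list[j]; j -= 1'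
-- (every index A uses is in range, so the total forms pyGetD/pySetD are exact here)
def pvInnerWhile (lst : List Int) (key : Int) (j : Int) : List Int × Int :=
  if h : 0 ≤ j ∧ key < PySem.List.pyGetD lst j 0 then
    pvInnerWhile (PySem.List.pySetD lst (j + 1) (PySem.List.pyGetD lst j 0)) key (j - 1)
  else (lst, j)
termination_by (j + 1).toNat
decreasing_by omega

-- one iteration of 'for i in range(1, n)'
def pvOuterStep (lst : List Int) (i : Int) : List Int :=
  let key := PySem.List.pyGetD lst i 0
  let r := pvInnerWhile lst key (i - 1)
  PySem.List.pySetD r.1 (r.2 + 1) key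

def sort_names (my_list : List String) : List String :=
  let new_list := my_list.foldl (fun acc i => acc ++ [PySem.Str.len i]) []
  let n := PySem.List.len new_list
  let new_list := (PySem.List.pyRange 1 n).foldl pvOuterStep new_list
  let my_dict := new_list.foldl
    (fun d i => my_list.foldl
      (fun d name => if PySem.Str.len name == i then d.insert i name else d) d)
    (PySem.Dict.empty : PySem.Dict Int String)
  my_dict.values

-- ===== PORT B =====
def sort_names_alt (my_list : List String) : List String :=
  let d := my_list.foldl (fun d name => d.insert (PySem.Str.len name) name)
    (PySem.Dict.empty : PySem.Dict Int String)
  -- 'd[l]' in Source B never raises (every l of sorted(d) is a key of d), so getD is exact here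
  (PySem.List.sorted (PySem.Dict.keys d) (fun x => x)).map (fun l => PySem.Dict.getD d l "")

-- ===== PRECONDITION & SPEC =====
def Spec_sort_names (my_list : List String) (out : List String) : Prop := out = sort_names_alt my_list
instance (my_list : List String) (out : List String) : Decidable (Spec_sort_names my_list out) := by unfold Spec_sort_names; infer_instance

-- ===== CLAIM (what is proved, stated in full; the proofs are below) =====
def Claim_equal_sort_names : Prop := ∀ (my_list : List String), Dom_sort_names my_list → Spec_sort_names my_list (sort_names my_list)

-- ===== LEMMAS AND PROOFS =====

-- last name of xs whose length is l (the value both dict constructions leave at key l)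
def lastW (xs : List String) (l : Int) : String :=
  xs.foldl (fun acc n => if PySem.Str.len n == l then n else acc) ""

-- insertion of key into A₁ scanning from the right, as A's while loop does
def insRev (key : Int) : List Int → List Int
  | [] => [key]
  | a :: rest => if key < a then a :: insRev key rest else key :: a :: rest

def insertR (key : Int) (A : List Int) : List Int := (insRev key A.reverse).reverse

theorem insertR_append (key a : Int) (A : List Int) :
    insertR key (A ++ [a]) =
      if key < a then insertR key A ++ [a] else A ++ [a, key] := by
  by_cases h : key < a <;> simp [insertR, insRev, h]

-- A's inner while loop followed by 'new_list[j+1] = key' inserts key from the right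
theorem inner_spec (key : Int) : ∀ (A₁ : List Int) (x : Int) (C : List Int),
    PySem.List.pySetD (pvInnerWhile (A₁ ++ x :: C) key ((A₁.length : Int) - 1)).1
        ((pvInnerWhile (A₁ ++ x :: C) key ((A₁.length : Int) - 1)).2 + 1) key
      = insertR key A₁ ++ C := by
  intro A₁
  induction A₁ using List.reverseRecOn with
  | nil =>
    intro x C
    rw [pvInnerWhile]
    simp [insertR, insRev]
    rw [PySem.List.pySetD_of_nonneg _ _ le_rfl]
    rfl
  | append_singleton A' a ih =>
    intro x C
    have hj : ((A' ++ [a]).length : Int) - 1 = ((A'.length : Nat) : Int) := by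
      simp
    have hget : PySem.List.pyGetD ((A' ++ [a]) ++ x :: C) ((A'.length : Nat) : Int) 0 = a := by
      rw [PySem.List.pyGetD_natCast]
      simp [List.append_assoc]
    rw [hj, pvInnerWhile, hget]
    by_cases h : key < a
    · rw [dif_pos (show (0:Int) ≤ (A'.length : Int) ∧ key < a from ⟨Int.natCast_nonneg _, h⟩)]
      have hset : PySem.List.pySetD ((A' ++ [a]) ++ x :: C) (((A'.length : Nat) : Int) + 1) a
          = A' ++ a :: (a :: C) := by
        rw [show (((A'.length : Nat) : Int) + 1) = ((A'.length + 1 : Nat) : Int) by push_cast; ring,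
          PySem.List.pySetD_natCast, List.append_assoc, List.set_append_right _ _ (by simp)]
        simp
      rw [hset, ih a (a :: C), insertR_append, if_pos h]
      simp
    · rw [dif_neg (by simp [h])]
      simp only []
      rw [show (((A'.length : Nat) : Int) + 1) = ((A'.length + 1 : Nat) : Int) by push_cast; ring,
        PySem.List.pySetD_natCast, insertR_append, if_neg h, List.append_assoc,
        List.set_append_right _ _ (by simp)]
      simp

theorem insertR_of_forall_lt (key : Int) (A : List Int) (h : ∀ y ∈ A, key < y) :
    insertR key A = key :: A := by
  induction A using List.reverseRecOn with
  | nil => rfl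
  | append_singleton A' a ih =>
    rw [insertR_append, if_pos (h a (by simp)), ih (fun y hy => h y (by simp [hy]))]
    simp

theorem insertR_cons_of_le (key a : Int) (h : a ≤ key) (A : List Int) :
    insertR key (a :: A) = a :: insertR key A := by
  induction A using List.reverseRecOn with
  | nil =>
    show insertR key ([] ++ [a]) = _
    rw [insertR_append, if_neg (by omega)]
    rfl
  | append_singleton A'' b ih =>
    rw [show a :: (A'' ++ [b]) = (a :: A'') ++ [b] by simp, insertR_append, insertR_append]
    by_cases hb : key < b <;> simp [hb, ih]

-- on a sorted list, inserting from the right agrees with stable insertion from the left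
theorem insertR_eq_insertBy (key : Int) (A : List Int)
    (h : A.Pairwise (fun a b => a ≤ b)) :
    insertR key A = PySem.List.insertBy (fun a b => decide (a < b)) key A := by
  induction A with
  | nil => rfl
  | cons a A' ih =>
    rw [List.pairwise_cons] at h
    by_cases hka : key < a
    · rw [PySem.List.insertBy, if_pos (by simpa using hka)]
      exact insertR_of_forall_lt key _ (by
        intro y hy
        rcases List.mem_cons.mp hy with rfl | hy
        · exact hka
        · exact lt_of_lt_of_le hka (h.1 y hy))
    · rw [PySem.List.insertBy, if_neg (by simpa using hka), insertR_cons_of_le key a (by omega),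
        ih h.2]

theorem sorted_append_singleton (l : List Int) (x : Int) :
    PySem.List.sorted (l ++ [x]) (fun y => y) =
      PySem.List.insertBy (fun a b => decide (a < b)) x (PySem.List.sorted l (fun y => y)) := by
  rw [PySem.List.sorted_eq_foldl_insertBy, PySem.List.sorted_eq_foldl_insertBy, List.foldl_append]
  rfl

-- loop invariant of 'for i in range(1, n)': the first i slots hold the sorted prefix
theorem outer_step (L : List Int) (i : Nat) (h2 : i < L.length) :
    pvOuterStep (PySem.List.sorted (L.take i) (fun x => x) ++ L.drop i) (i : Int)
      = PySem.List.sorted (L.take (i + 1)) (fun x => x) ++ L.drop (i + 1) := by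
  have hP : (PySem.List.sorted (L.take i) (fun x => x)).length = i := by
    rw [PySem.List.length_sorted, List.length_take]; omega
  have hdrop : L.drop i = L[i] :: L.drop (i + 1) := by
    rw [List.drop_eq_getElem_cons h2]
  have hsplit : PySem.List.sorted (L.take i) (fun x => x) ++ L.drop i
      = PySem.List.sorted (L.take i) (fun x => x) ++ L[i] :: L.drop (i + 1) := by
    rw [hdrop]
  have hkey : PySem.List.pyGetD
      (PySem.List.sorted (L.take i) (fun x => x) ++ L[i] :: L.drop (i + 1)) (i : Int) 0 = L[i] := by
    rw [PySem.List.pyGetD_natCast, List.getD_eq_getElem?_getD, List.getElem?_append_right (by omega)]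
    simp [hP, List.getElem?_eq_getElem h2]
  unfold pvOuterStep
  rw [hsplit, hkey]
  have h := inner_spec L[i] (PySem.List.sorted (L.take i) (fun x => x)) L[i] (L.drop (i + 1))
  rw [hP] at h
  rw [h, insertR_eq_insertBy _ _ (PySem.List.sorted_pairwise _ _), ← sorted_append_singleton,
    List.take_add_one, List.getElem?_eq_getElem h2]
  rfl

theorem outer_fold (L : List Int) : ∀ (i : Nat), 1 ≤ i → i ≤ L.length →
    (PySem.List.pyRange 1 (i : Int)).foldl pvOuterStep L
      = PySem.List.sorted (L.take i) (fun x => x) ++ L.drop i := by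
  intro i
  induction i with
  | zero => omega
  | succ k ih =>
    intro _ hlen
    by_cases hk : 1 ≤ k
    · have hsplit : PySem.List.pyRange 1 ((k + 1 : Nat) : Int)
          = PySem.List.pyRange 1 (k : Int) ++ [(k : Int)] := by
        rw [PySem.List.pyRange_one_append 1 (k : Int) ((k + 1 : Nat) : Int)
          (by omega) (by push_cast; omega)]
        congr 1
        rw [PySem.List.pyRange_one_cons (by push_cast; omega)]
        congr 1
        simp [PySem.List.pyRange]
      rw [hsplit, List.foldl_append, ih hk (by omega)]
      simpa using outer_step L k (by omega)
    · have hk0 : k = 0 := by omega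
      subst hk0
      rw [show PySem.List.pyRange 1 ((1 : Nat) : Int) = [] by simp [PySem.List.pyRange]]
      have hL1 : L.take 1 = [L[0]] := by
        rw [List.take_add_one, List.take_zero, List.getElem?_eq_getElem (by omega)]; rfl
      rw [hL1]
      have hs : PySem.List.sorted [L[0]] (fun x : Int => x) = [L[0]] := rfl
      rw [hs]
      simp
      cases L with
      | nil => simp at hlen
      | cons a t => simp

-- A's in-place insertion sort computes sorted(lengths)
theorem sorted_arr_eq (L : List Int) :
    (PySem.List.pyRange 1 (PySem.List.len L)).foldl pvOuterStep L
      = PySem.List.sorted L (fun x => x) := by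
  by_cases h : 1 ≤ L.length
  · rw [show PySem.List.len L = ((L.length : Nat) : Int) from rfl, outer_fold L L.length h le_rfl]
    simp
  · have h0 : L = [] := by
      cases L
      · rfl
      · simp at h
    subst h0
    rfl

theorem lastW_append (xs : List String) (n : String) (l : Int) :
    lastW (xs ++ [n]) l = if PySem.Str.len n == l then n else lastW xs l := by
  simp [lastW]

-- A's inner 'for name in my_list' pass leaves the last name of length l at key l
theorem name_loop (xs : List String) (l : Int) : ∀ (d : PySem.Dict Int String),
    xs.foldl (fun d name => if PySem.Str.len name == l then d.insert l name else d) d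
      = if l ∈ xs.map PySem.Str.len then d.insert l (lastW xs l) else d := by
  induction xs using List.reverseRecOn with
  | nil => intro d; simp
  | append_singleton xs n ih =>
    intro d
    rw [List.foldl_append, List.foldl_cons, List.foldl_nil, ih d, lastW_append]
    by_cases hn : PySem.Str.len n = l
    · have hb : (PySem.Str.len n == l) = true := beq_iff_eq.mpr hn
      have hmem : l ∈ (xs ++ [n]).map PySem.Str.len := by
        rw [List.map_append, List.map_cons, List.map_nil]
        exact List.mem_append_right _ (List.mem_singleton.mpr hn.symm)
      rw [hb, if_pos rfl, if_pos rfl, if_pos hmem]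
      by_cases hm : l ∈ xs.map PySem.Str.len
      · rw [if_pos hm, PySem.Dict.insert_insert_self]
      · rw [if_neg hm]
    · have hb : (PySem.Str.len n == l) = false := by
        rw [beq_eq_false_iff_ne]; exact hn
      have hiff : (l ∈ (xs ++ [n]).map PySem.Str.len) ↔ l ∈ xs.map PySem.Str.len := by
        rw [List.map_append, List.map_cons, List.map_nil, List.mem_append, List.mem_singleton]
        exact or_iff_left (fun h => hn h.symm)
      rw [hb]
      simp only [Bool.false_eq_true, if_false]
      by_cases hm : l ∈ xs.map PySem.Str.len
      · rw [if_pos hm, if_pos (hiff.mpr hm)]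
      · rw [if_neg hm, if_neg (fun h => hm (hiff.mp h))]

-- items of a fold of key-determined inserts: one pair per distinct key, in first-seen order
theorem fold_insert_items (f : Int → String) :
    ∀ (S : List Int) (d : PySem.Dict Int String) (K : List Int),
      d.items = K.map (fun k => (k, f k)) →
      (S.foldl (fun d k => d.insert k (f k)) d).items
        = (PySem.Set.update K S).map (fun k => (k, f k)) := by
  intro S
  induction S with
  | nil => intro d K hd; simpa [PySem.Set.update] using hd
  | cons k S ih =>
    intro d K hd
    have hkeys : d.keys = K := by
      simp [PySem.Dict.keys, hd, List.map_map, Function.comp_def]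
    have hcont : d.contains k = decide (k ∈ K) := by
      rw [PySem.Dict.contains_eq_decide_mem_keys, hkeys]
    have hstep : (d.insert k (f k)).items = (PySem.Set.add K k).map (fun j => (j, f j)) := by
      by_cases hk : k ∈ K
      · rw [PySem.Dict.insert, hcont]
        simp only [hk, decide_true, if_true]
        show List.map _ d.items = _
        rw [hd, List.map_map, PySem.Set.add_of_mem hk]
        apply List.map_congr_left
        intro j _
        by_cases hj : j = k <;> simp [hj]
      · rw [PySem.Dict.insert, hcont]
        simp only [hk, decide_false, Bool.false_eq_true, if_false]
        show d.items ++ _ = _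
        rw [hd, show PySem.Set.add K k = K ++ [k] by simp [PySem.Set.add, PySem.Set.contains, hk]]
        simp
    rw [List.foldl_cons, ih _ _ hstep]
    simp [PySem.Set.update]

-- B's dict pass leaves the last name of length l at key l
theorem b_get (l : Int) : ∀ (xs : List String) (d : PySem.Dict Int String),
    (xs.foldl (fun d name => d.insert (PySem.Str.len name) name) d).get? l
      = if l ∈ xs.map PySem.Str.len then some (lastW xs l) else d.get? l := by
  intro xs
  induction xs using List.reverseRecOn with
  | nil => intro d; simp
  | append_singleton xs n ih =>
    intro d
    rw [List.foldl_append, List.foldl_cons, List.foldl_nil, lastW_append]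
    by_cases hn : PySem.Str.len n = l
    · rw [show PySem.Str.len n = l from hn, PySem.Dict.get?_insert_self,
        if_pos (by rw [List.map_append, List.map_cons, List.map_nil];
                   exact List.mem_append_right _ (List.mem_singleton.mpr hn.symm))]
      simp
    · rw [PySem.Dict.get?_insert_of_ne _ _ (fun h => hn h.symm), ih d,
        show (PySem.Str.len n == l) = false by rw [beq_eq_false_iff_ne]; exact hn]
      simp only [Bool.false_eq_true, if_false]
      have hiff : (l ∈ (xs ++ [n]).map PySem.Str.len) ↔ l ∈ xs.map PySem.Str.len := by
        rw [List.map_append, List.map_cons, List.map_nil, List.mem_append, List.mem_singleton]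
        exact or_iff_left (fun h => hn h.symm)
      by_cases hm : l ∈ xs.map PySem.Str.len
      · rw [if_pos hm, if_pos (hiff.mpr hm)]
      · rw [if_neg hm, if_neg (fun h => hm (hiff.mp h))]

theorem ofList_sublist (xs : List Int) : (PySem.Set.ofList xs).Sublist xs := by
  induction xs using List.reverseRecOn with
  | nil => simp [PySem.Set.ofList, PySem.Set.empty]
  | append_singleton xs x ih =>
    rw [PySem.Set.ofList_eq_foldl, List.foldl_append, List.foldl_cons, List.foldl_nil,
      ← PySem.Set.ofList_eq_foldl]
    by_cases hx : x ∈ PySem.Set.ofList xs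
    · rw [PySem.Set.add_of_mem hx]
      exact ih.trans (List.sublist_append_left _ _)
    · rw [show PySem.Set.add (PySem.Set.ofList xs) x = PySem.Set.ofList xs ++ [x] by
        simp [PySem.Set.add, PySem.Set.contains]
        exact fun h => hx ((PySem.Set.mem_ofList xs x).mpr h)]
      exact ih.append (List.Sublist.refl _)

-- the distinct lengths in sorted order, reached from either side
theorem keys_eq (L : List Int) :
    PySem.Set.ofList (PySem.List.sorted L (fun x => x))
      = PySem.List.sorted (PySem.Set.ofList L) (fun x => x) := by
  symm
  apply PySem.List.sorted_eq_of_perm_of_pairwise_lt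
  · apply List.perm_of_nodup_nodup_toFinset_eq (PySem.Set.nodup_ofList _) (PySem.Set.nodup_ofList _)
    ext a
    simp [List.mem_toFinset, PySem.Set.mem_ofList, PySem.List.mem_sorted]
  · have hle : (PySem.List.sorted L (fun x : Int => x)).Pairwise (fun a b => a ≤ b) :=
      PySem.List.sorted_pairwise _ _
    have hle' := List.Pairwise.sublist (ofList_sublist (PySem.List.sorted L (fun x => x))) hle
    have hne : (PySem.Set.ofList (PySem.List.sorted L (fun x => x))).Pairwise
        (fun a b : Int => a ≠ b) := PySem.Set.nodup_ofList _
    exact (hle'.and hne).imp (fun h => lt_of_le_of_ne h.1 h.2)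

-- ===== VERDICT (by name: the statement is the Claim_ definition above) =====
theorem sort_names_spec : Claim_equal_sort_names := by
  intro my_list _
  unfold Spec_sort_names
  simp only [sort_names, sort_names_alt]
  have hL : my_list.foldl (fun acc i => acc ++ [PySem.Str.len i]) ([] : List Int)
      = my_list.map PySem.Str.len := by
    rw [PySem.List.foldl_append_eq_flatMap, List.nil_append, ← List.map_eq_flatMap]
  rw [hL, sorted_arr_eq]
  have hcongr : (PySem.List.sorted (my_list.map PySem.Str.len) (fun x => x)).foldl
      (fun d i => my_list.foldl
        (fun d name => if PySem.Str.len name == i then d.insert i name else d) d)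
      (PySem.Dict.empty : PySem.Dict Int String)
      = (PySem.List.sorted (my_list.map PySem.Str.len) (fun x => x)).foldl
        (fun d k => d.insert k (lastW my_list k)) PySem.Dict.empty := by
    apply PySem.List.foldl_congr_mem
    intro d k hk
    rw [name_loop my_list k d,
      if_pos ((PySem.List.mem_sorted (my_list.map PySem.Str.len) _ false k).mp hk)]
  rw [hcongr]
  have hitems := fold_insert_items (lastW my_list)
    (PySem.List.sorted (my_list.map PySem.Str.len) (fun x => x)) PySem.Dict.empty [] rfl
  rw [PySem.Set.update_nil_left] at hitems
  -- A's result: the distinct sorted lengths, each mapped to its last name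
  have hA : (PySem.Dict.values ((PySem.List.sorted (my_list.map PySem.Str.len) (fun x => x)).foldl
      (fun d k => d.insert k (lastW my_list k)) PySem.Dict.empty))
      = (PySem.Set.ofList (PySem.List.sorted (my_list.map PySem.Str.len) (fun x => x))).map
          (lastW my_list) := by
    rw [PySem.Dict.values, hitems, List.map_map]
    rfl
  rw [hA]
  -- B's result
  have hkeysB : (my_list.foldl (fun d name => d.insert (PySem.Str.len name) name)
      (PySem.Dict.empty : PySem.Dict Int String)).keys
      = PySem.Set.ofList (my_list.map PySem.Str.len) := by
    rw [PySem.Dict.keys_foldl_insert_key my_list PySem.Str.len (fun _ x => x) PySem.Dict.empty]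
    rw [show (PySem.Dict.empty : PySem.Dict Int String).keys = [] from rfl,
      PySem.Set.update_nil_left]
  rw [hkeysB]
  have hB : (PySem.List.sorted (PySem.Set.ofList (my_list.map PySem.Str.len)) (fun x => x)).map
      (fun l => PySem.Dict.getD (my_list.foldl
        (fun d name => d.insert (PySem.Str.len name) name)
        (PySem.Dict.empty : PySem.Dict Int String)) l "")
      = (PySem.List.sorted (PySem.Set.ofList (my_list.map PySem.Str.len)) (fun x => x)).map
          (lastW my_list) := by
    apply List.map_congr_left
    intro l hl
    have hlmem : l ∈ my_list.map PySem.Str.len := by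
      have := (PySem.List.mem_sorted _ _ false l).mp hl
      exact (PySem.Set.mem_ofList _ l).mp this
    rw [PySem.Dict.getD, b_get l my_list PySem.Dict.empty, if_pos hlmem]
    rfl
  rw [hB, keys_eq]
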